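-- pv_equiv track=rewrite | github.com/jediahkatz/course-planning-constraint-program | src/fetch_data.py | get_top_level_operator
-- ===== SOURCE A (Python) =====
-- def get_top_level_operator(prereq_string: str) -> str:
--     """
--     Pre-req parser helper
--     Returns AND, OR, MIXED, or NONE as the top lvl operator of a prereq string
--     """
--     current_top_level = "NONE"
--     open_bracket_count = 0
--     parts = prereq_string.upper().split(' ')
--     for part in parts:
--         if part == '(':
--             open_bracket_count += 1
--         elif part == ')':
--             open_bracket_count -= 1
--         elif part in ['AND', 'OR']:
--             if open_bracket_count == 0:
--                 if part != current_top_level and current_top_level != "NONE":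
--                     current_top_level = "MIXED"
--                     break
--                 current_top_level = part
--     return current_top_level
-- ===== SOURCE B (Python) =====
-- def get_top_level_operator(prereq_string: str) -> str:
--     """
--     Pre-req parser helper
--     Returns AND, OR, MIXED, or NONE as the top lvl operator of a prereq string
--     """
--     parts = prereq_string.upper().split(' ')
--     ops = {p for i, p in enumerate(parts)
--            if p in ('AND', 'OR')
--            and parts[:i].count('(') == parts[:i].count(')')}
--     if not ops:
--         return "NONE"
--     if len(ops) == 1:
--         return ops.pop()
--     return "MIXED"
-- ===== Notes on version B (the rewrite author's own statement) =====
-- stated objective: alternative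
-- what changed: B keeps no running state at all: an operator token counts as top-level iff its prefix parts[:i] contains equally many open-bracket and close-bracket tokens (a positional characterisation replacing A's running depth counter), the matching tokens are collected into a set by one comprehension, and NONE/single/MIXED is decided once afterwards instead of A's incremental scalar with an early break; B trades A's O(n) single pass for quadratic prefix counting.
import Mathlib
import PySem

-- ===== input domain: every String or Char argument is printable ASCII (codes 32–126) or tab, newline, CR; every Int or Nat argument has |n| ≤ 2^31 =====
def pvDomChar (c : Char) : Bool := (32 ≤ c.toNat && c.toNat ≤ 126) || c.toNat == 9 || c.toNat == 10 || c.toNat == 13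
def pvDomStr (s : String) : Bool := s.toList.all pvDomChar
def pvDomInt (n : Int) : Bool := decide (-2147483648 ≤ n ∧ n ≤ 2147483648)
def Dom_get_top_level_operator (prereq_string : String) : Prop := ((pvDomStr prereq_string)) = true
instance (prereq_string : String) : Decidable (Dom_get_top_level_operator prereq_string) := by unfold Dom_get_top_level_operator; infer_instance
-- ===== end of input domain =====

-- B replaces A's running depth counter by a stateless positional test (a token is top-level
-- iff its prefix holds equally many open- and close-bracket tokens), a set comprehension, and one post-loop decision.

-- ===== PORT A =====
-- A's loop: scalar current_top_level, running bracket depth, early break to "MIXED" on a mismatch.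
def pvLoopA : List String → String → Int → String
  | [], cur, _ => cur
  | p :: ps, cur, depth =>
    if p = "(" then pvLoopA ps cur (depth + 1)
    else if p = ")" then pvLoopA ps cur (depth - 1)
    else if p = "AND" ∨ p = "OR" then
      if depth = 0 then
        if p ≠ cur ∧ cur ≠ "NONE" then "MIXED"   -- break
        else pvLoopA ps p depth
      else pvLoopA ps cur depth
    else pvLoopA ps cur depth

-- split(' ') with the nonempty separator " " never fails, so split? is always `some`; .getD [] is its total form.
def get_top_level_operator (prereq_string : String) : String :=
  pvLoopA ((PySem.Str.split? (PySem.Str.upper prereq_string) " ").getD []) "NONE" 0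

-- ===== PORT B =====
-- B's set comprehension: {p for i, p in enumerate(parts) if p in ('AND','OR')
--                         and parts[:i].count('(') == parts[:i].count(')')}
def pvOpsB (parts : List String) : PySem.Set String :=
  (PySem.List.enumerate parts).foldl
    (fun s ip =>
      if (ip.2 = "AND" ∨ ip.2 = "OR") ∧
         PySem.List.count (parts.take ip.1.toNat) "(" =
           PySem.List.count (parts.take ip.1.toNat) ")"
      then s.add ip.2 else s)
    PySem.Set.empty

-- the post-loop decision: empty → NONE, singleton → its element (ops.pop()), else MIXED
def pvFinal : PySem.Set String → String
  | [] => "NONE"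
  | [op] => op
  | _ => "MIXED"

def get_top_level_operator_alt (prereq_string : String) : String :=
  pvFinal (pvOpsB ((PySem.Str.split? (PySem.Str.upper prereq_string) " ").getD []))

-- ===== PRECONDITION & SPEC =====
def Spec_get_top_level_operator (prereq_string : String) (out : String) : Prop := out = get_top_level_operator_alt prereq_string
instance (prereq_string : String) (out : String) : Decidable (Spec_get_top_level_operator prereq_string out) := by unfold Spec_get_top_level_operator; infer_instance

-- ===== CLAIM (what is proved, stated in full; the proofs are below) =====
def Claim_equal_get_top_level_operator : Prop := ∀ (prereq_string : String), Dom_get_top_level_operator prereq_string → Spec_get_top_level_operator prereq_string (get_top_level_operator prereq_string)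

-- ===== LEMMAS AND PROOFS =====

-- ghost loop (proof-side only): B's set computed with a running depth, matching A's traversal
def pvLoopB : List String → PySem.Set String → Int → PySem.Set String
  | [], s, _ => s
  | p :: ps, s, depth =>
    if p = "(" then pvLoopB ps s (depth + 1)
    else if p = ")" then pvLoopB ps s (depth - 1)
    else if (p = "AND" ∨ p = "OR") ∧ depth = 0 then pvLoopB ps (s.add p) depth
    else pvLoopB ps s depth

-- B's prefix-count fold equals the ghost depth loop
lemma pvFold_eq_loop (parts : List String) (ps : List String) :
    ∀ (pre : List String) (s : PySem.Set String), parts = pre ++ ps →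
    (PySem.List.enumerate ps (pre.length : Int)).foldl
      (fun s ip =>
        if (ip.2 = "AND" ∨ ip.2 = "OR") ∧
           PySem.List.count (parts.take ip.1.toNat) "(" =
             PySem.List.count (parts.take ip.1.toNat) ")"
        then s.add ip.2 else s) s
    = pvLoopB ps s ((pre.count "(" : Int) - (pre.count ")" : Int)) := by
  induction ps with
  | nil => intro pre s _; simp [PySem.List.enumerate, pvLoopB]
  | cons p ps ih =>
    intro pre s hparts
    have htake : parts.take ((pre.length : Int)).toNat = pre := by
      simpa [hparts] using List.take_left (l₁ := pre) (l₂ := p :: ps)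
    rw [PySem.List.enumerate_cons, List.foldl_cons]
    have hlen : (pre.length : Int) + 1 = ((pre ++ [p]).length : Int) := by
      simp
    have hparts' : parts = (pre ++ [p]) ++ ps := by simp [hparts]
    rw [hlen, ih (pre ++ [p]) _ hparts']
    simp only [htake]
    simp only [pvLoopB]
    have hd0 : ((pre.count "(" : Int) - (pre.count ")" : Int) = 0) ↔
        (pre.count "(" = pre.count ")") := by omega
    by_cases h1 : p = "("
    · have hop : ¬ (p = "AND" ∨ p = "OR") := by simp [h1]
      simp [h1, List.count_append]
      ring_nf
    · by_cases h2 : p = ")"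
      · have hop : ¬ (p = "AND" ∨ p = "OR") := by simp [h2]
        simp [h2, List.count_append]
        ring_nf
      · have hcnt : ((pre ++ [p]).count "(" : Int) - ((pre ++ [p]).count ")" : Int)
            = (pre.count "(" : Int) - (pre.count ")" : Int) := by
          simp [List.count_append, h1, h2]
        rw [hcnt]
        by_cases h3 : p = "AND" ∨ p = "OR"
        · by_cases h4 : (pre.count "(" : Int) - (pre.count ")" : Int) = 0
          · have hc := hd0.mp h4
            simp [h1, h2, h3, hc]
          · have hc : ¬ pre.count "(" = pre.count ")" := fun h => h4 (hd0.mpr h)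
            simp [h1, h2, h3, h4, hc]
        · simp [h1, h2, h3]

-- elements of the set persist through the ghost loop
lemma pvLoopB_mono (ps : List String) : ∀ (s : PySem.Set String) (d : Int) (x : String),
    x ∈ s → x ∈ pvLoopB ps s d := by
  induction ps with
  | nil => intro s d x hx; simp [pvLoopB]; exact hx
  | cons p ps ih =>
    intro s d x hx
    simp only [pvLoopB]
    split_ifs with h1 h2 h3
    · exact ih _ _ _ hx
    · exact ih _ _ _ hx
    · exact ih _ _ _ ((PySem.Set.mem_add s p x).mpr (Or.inl hx))
    · exact ih _ _ _ hx

-- a set with two distinct members is finalized to MIXED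
lemma pvFinal_mixed (s : PySem.Set String) (a b : String)
    (ha : a ∈ s) (hb : b ∈ s) (hab : a ≠ b) : pvFinal s = "MIXED" := by
  match s with
  | [] => cases ha
  | [x] =>
    simp only [List.mem_singleton] at ha hb
    exact absurd (ha.trans hb.symm) hab
  | x :: y :: rest => rfl

-- loop invariant: A's scalar state corresponds to the ghost loop's set state
lemma pvLoop_eq (ps : List String) : ∀ (d : Int) (cur : String) (s : PySem.Set String),
    (cur = "NONE" ∧ s = []) ∨ ((cur = "AND" ∨ cur = "OR") ∧ s = [cur]) →
    pvLoopA ps cur d = pvFinal (pvLoopB ps s d) := by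
  induction ps with
  | nil =>
    intro d cur s hinv
    rcases hinv with ⟨hc, hs⟩ | ⟨hc, hs⟩ <;> subst hs <;> simp [pvLoopA, pvLoopB, pvFinal, hc]
  | cons p ps ih =>
    intro d cur s hinv
    simp only [pvLoopA, pvLoopB]
    by_cases h1 : p = "("
    · simp only [h1, if_pos]; exact ih _ _ _ hinv
    · by_cases h2 : p = ")"
      · simp [h2]; exact ih _ _ _ hinv
      · by_cases h3 : p = "AND" ∨ p = "OR"
        · by_cases h4 : d = 0
          · simp only [if_neg h1, if_neg h2, if_pos h3, if_pos h4, if_pos (And.intro h3 h4)]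
            by_cases h5 : p ≠ cur ∧ cur ≠ "NONE"
            · -- A breaks to MIXED; B's set now holds two distinct operators
              simp only [if_pos h5]
              rcases hinv with ⟨hc, _⟩ | ⟨hc, hs⟩
              · exact absurd hc h5.2
              · subst hs
                have hcur : cur ∈ PySem.Set.add [cur] p :=
                  (PySem.Set.mem_add [cur] p cur).mpr (Or.inl (List.mem_singleton.mpr rfl))
                have hp : p ∈ PySem.Set.add [cur] p :=
                  (PySem.Set.mem_add [cur] p p).mpr (Or.inr rfl)
                exact (pvFinal_mixed _ cur p (pvLoopB_mono _ _ _ _ hcur)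
                  (pvLoopB_mono _ _ _ _ hp) (Ne.symm h5.1)).symm
            · -- A sets cur := p; B's set becomes [p]
              simp only [if_neg h5]
              apply ih
              right
              refine ⟨h3, ?_⟩
              rcases hinv with ⟨hc, hs⟩ | ⟨hc, hs⟩
              · subst hs; rfl
              · subst hs
                have hpc : p = cur := by
                  by_contra hne
                  rcases h3 with h | h <;>
                    exact h5 ⟨hne, by rcases hc with hc | hc <;> simp [hc]⟩
                subst hpc
                simp [PySem.Set.add]
          · have hcond : ¬ ((p = "AND" ∨ p = "OR") ∧ d = 0) := fun h => h4 h.2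
            simp only [if_neg h1, if_neg h2, if_pos h3, if_neg h4, if_neg hcond]
            exact ih _ _ _ hinv
        · have : ¬ ((p = "AND" ∨ p = "OR") ∧ d = 0) := fun h => h3 h.1
          simp only [if_neg h1, if_neg h2, if_neg h3, if_neg this]
          exact ih _ _ _ hinv

-- ===== VERDICT (by name: the statement is the Claim_ definition above) =====
theorem get_top_level_operator_spec : Claim_equal_get_top_level_operator := by
  intro s _
  unfold Spec_get_top_level_operator get_top_level_operator get_top_level_operator_alt pvOpsB
  have h := pvFold_eq_loop ((PySem.Str.split? (PySem.Str.upper s) " ").getD [])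
      ((PySem.Str.split? (PySem.Str.upper s) " ").getD []) [] PySem.Set.empty (by simp)
  simp only [List.length_nil, Nat.cast_zero, List.count_nil, sub_zero] at h
  rw [h]
  exact pvLoop_eq _ 0 "NONE" PySem.Set.empty (Or.inl ⟨rfl, rfl⟩)
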